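-- pv_equiv track=rewrite | github.com/hyunaeee/codetest_solutions | 3_final.py | moocount
-- ===== SOURCE A (Python) =====
-- def moocount(N, F, sss):
--     result = set()
--     ptp = {}
--
--     for i in range(N - 2):
--         if sss[i+1] == sss[i+2] and sss[i] != sss[i+1]:
--             pt = sss[i:i+3]
--             if pt not in ptp:
--                 ptp[pt] = []
--             ptp[pt].append(i)
--
--     for pt, p in ptp.items():
--         if len(p) >= F:
--             result.add(pt)
--
--     for i in range(N):
--         o = sss[i]
--         affected_range = range(max(0, i-2), min(N-2, i+1))
--
--         affected_pt = set()
--         for j in affected_range: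
--             if j+2 < N and sss[j+1] == sss[j+2] and sss[j] != sss[j+1]:
--                 affected_pt.add(sss[j:j+3])
--
--         for c in 'abcdefghijklmnopqrstuvwxyz':
--             if c == o:
--                 continue
--
--             ptc = {}
--
--             for pt, p in ptp.items():
--                 ptc[pt] = len(p)
--
--             for j in affected_range:
--                 if j+2 < N and sss[j:j+3] in affected_pt:
--                     ptc[sss[j:j+3]] -= 1
--
--                 ns = sss[j:i] + c + sss[i+1:j+3] if i in range(j, j+3) else sss[j:j+3]
--                 if len(ns) == 3 and ns[1] == ns[2] and ns[0] != ns[1]: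
--                     ptc[ns] = ptc.get(ns, 0) + 1
--
--             for pt, count in ptc.items():
--                 if count >= F:
--                     result.add(pt)
--
--     return sorted(list(result))
-- ===== SOURCE B (Python) =====
-- def moocount(N, F, sss):
--     def ok(w):
--         return len(w) == 3 and w[1] == w[2] and w[0] != w[1]
--
--     base = {}
--     for i in range(N - 2):
--         w = sss[i:i+3]
--         if ok(w):
--             base[w] = base.get(w, 0) + 1
--
--     result = set()
--     for pt, cnt in base.items():
--         if cnt >= F:
--             result.add(pt)
--
--     for i in range(N):
--         o = sss[i]
--         js = range(max(0, i - 2), min(N - 2, i + 1))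
--         removed = [sss[j:j+3] for j in js if ok(sss[j:j+3])]
--         for c in 'abcdefghijklmnopqrstuvwxyz':
--             if c == o:
--                 continue
--             delta = {}
--             for w in removed:
--                 delta[w] = delta.get(w, 0) - 1
--             for j in js:
--                 ns = sss[j:i] + c + sss[i+1:j+3]
--                 if ok(ns):
--                     delta[ns] = delta.get(ns, 0) + 1
--             for pt, d in delta.items():
--                 if base.get(pt, 0) + d >= F:
--                     result.add(pt)
--
--     return sorted(result)
-- ===== Notes on version B (the rewrite author's own statement) =====
-- stated objective: alternative
-- what changed: B replaces A's per-edit full copy and rescan of the whole pattern-count dict (for every position and every replacement letter) by a baseline count dict whose qualifying patterns are added once plus a tiny per-edit delta dict over only the <=3 affected windows; A's auxiliary affected_pt set and positions-list dict disappear.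
import Mathlib
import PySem

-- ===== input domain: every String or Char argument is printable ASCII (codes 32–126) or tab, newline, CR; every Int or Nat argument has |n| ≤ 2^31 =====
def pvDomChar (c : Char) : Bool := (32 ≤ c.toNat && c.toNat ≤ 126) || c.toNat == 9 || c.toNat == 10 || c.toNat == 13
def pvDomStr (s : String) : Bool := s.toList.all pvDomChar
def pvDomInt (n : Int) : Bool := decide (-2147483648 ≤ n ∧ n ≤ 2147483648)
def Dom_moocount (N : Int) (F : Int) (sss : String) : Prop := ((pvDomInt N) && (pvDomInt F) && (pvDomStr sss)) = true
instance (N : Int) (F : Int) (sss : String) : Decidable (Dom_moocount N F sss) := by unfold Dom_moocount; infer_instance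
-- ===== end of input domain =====

-- B replaces A's per-edit full dict copy/rescan by per-edit delta dicts over the ≤3 affected
-- windows on top of a baseline count dict whose qualifying patterns are added once.
-- Strings are handled as lists of code points (PySem convention); the pattern strings are packed
-- with String.ofList only at the very end ('<' on List Char is Python's str '<').

-- ===== PORT A =====
-- helper stages of A (A's code split into named pieces; same computation, same order)
def mooA_ptp (N : Int) (s : List Char) : PySem.Dict (List Char) (List Int) :=
  (PySem.List.pyRange 0 (N - 2)).foldl (fun d i =>
    if (PySem.List.pyGetD s (i+1) ' ' == PySem.List.pyGetD s (i+2) ' ')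
        && !(PySem.List.pyGetD s i ' ' == PySem.List.pyGetD s (i+1) ' ') then
      -- `if pt not in ptp: ptp[pt] = []` followed by `ptp[pt].append(i)`
      d.modify (PySem.List.slice s (some i) (some (i+3))) [] (fun l => l ++ [i])
    else d) PySem.Dict.empty

def mooA_affected (N : Int) (s : List Char) (js : List Int) : PySem.Set (List Char) :=
  js.foldl (fun a j =>
    if decide (j + 2 < N)
        && (PySem.List.pyGetD s (j+1) ' ' == PySem.List.pyGetD s (j+2) ' ')
        && !(PySem.List.pyGetD s j ' ' == PySem.List.pyGetD s (j+1) ' ') then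
      a.add (PySem.List.slice s (some j) (some (j+3)))
    else a) PySem.Set.empty

-- body of A's inner `for j in affected_range` loop
def mooA_ptcstep (N : Int) (s : List Char) (affected : PySem.Set (List Char))
    (i : Int) (c : Char) (d : PySem.Dict (List Char) Int) (j : Int) :
    PySem.Dict (List Char) Int :=
  let wj := PySem.List.slice s (some j) (some (j+3))
  let d1 := if decide (j + 2 < N) && affected.contains wj then
      d.modify wj 0 (fun x => x - 1)  -- ptc[wj] -= 1 (key provably present under Pre_)
    else d
  let ns := if decide (j ≤ i) && decide (i < j + 3) then
      PySem.List.slice s (some j) (some i) ++ [c] ++ PySem.List.slice s (some (i+1)) (some (j+3))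
    else wj
  if (ns.length == 3) && (PySem.List.pyGetD ns 1 ' ' == PySem.List.pyGetD ns 2 ' ')
      && !(PySem.List.pyGetD ns 0 ' ' == PySem.List.pyGetD ns 1 ' ') then
    d1.modify ns 0 (fun x => x + 1)  -- ptc[ns] = ptc.get(ns, 0) + 1
  else d1

def mooA_cstep (N F : Int) (s : List Char) (ptp : PySem.Dict (List Char) (List Int))
    (i : Int) (js : List Int) (affected : PySem.Set (List Char)) (o : Char)
    (r : PySem.Set (List Char)) (c : Char) : PySem.Set (List Char) :=
  if c == o then r
  else
    ((js.foldl (mooA_ptcstep N s affected i c)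
        (ptp.items.foldl (fun d pv => d.insert pv.1 (pv.2.length : Int))
          PySem.Dict.empty)).items).foldl
      (fun r pv => if F ≤ pv.2 then r.add pv.1 else r) r

def mooA_inner (N F : Int) (s : List Char) (ptp : PySem.Dict (List Char) (List Int))
    (r : PySem.Set (List Char)) (i : Int) : PySem.Set (List Char) :=
  let o := PySem.List.pyGetD s i ' '
  let js := PySem.List.pyRange (max 0 (i-2)) (min (N-2) (i+1))
  let affected := mooA_affected N s js
  "abcdefghijklmnopqrstuvwxyz".toList.foldl (mooA_cstep N F s ptp i js affected o) r

def moocount (N : Int) (F : Int) (sss : String) : List String :=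
  let s := sss.toList
  let ptp := mooA_ptp N s
  let result0 : PySem.Set (List Char) :=
    ptp.items.foldl (fun r pv => if F ≤ (pv.2.length : Int) then r.add pv.1 else r) PySem.Set.empty
  let result := (PySem.List.pyRange 0 N).foldl (mooA_inner N F s ptp) result0
  PySem.List.sorted (result.map String.ofList) (fun x => x)

-- ===== PORT B =====
-- ok(w) of Source B
def pvOk3 (w : List Char) : Bool :=
  (w.length == 3) && (PySem.List.pyGetD w 1 ' ' == PySem.List.pyGetD w 2 ' ')
    && !(PySem.List.pyGetD w 0 ' ' == PySem.List.pyGetD w 1 ' ')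

def mooB_base (N : Int) (s : List Char) : PySem.Dict (List Char) Int :=
  (PySem.List.pyRange 0 (N - 2)).foldl (fun d i =>
    let w := PySem.List.slice s (some i) (some (i+3))
    if pvOk3 w then d.modify w 0 (fun x => x + 1) else d) PySem.Dict.empty

-- body of B's `for j in js` loop
def mooB_deltastep (s : List Char) (i : Int) (c : Char)
    (d : PySem.Dict (List Char) Int) (j : Int) : PySem.Dict (List Char) Int :=
  let ns := PySem.List.slice s (some j) (some i) ++ [c] ++ PySem.List.slice s (some (i+1)) (some (j+3))
  if pvOk3 ns then d.modify ns 0 (fun x => x + 1) else d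

def mooB_cstep (F : Int) (s : List Char) (base : PySem.Dict (List Char) Int)
    (i : Int) (js : List Int) (removed : List (List Char)) (o : Char)
    (r : PySem.Set (List Char)) (c : Char) : PySem.Set (List Char) :=
  if c == o then r
  else
    let delta0 : PySem.Dict (List Char) Int :=
      removed.foldl (fun d w => d.modify w 0 (fun x => x - 1)) PySem.Dict.empty
    let delta : PySem.Dict (List Char) Int := js.foldl (mooB_deltastep s i c) delta0
    delta.items.foldl (fun r pv => if F ≤ base.getD pv.1 0 + pv.2 then r.add pv.1 else r) r

def mooB_inner (N F : Int) (s : List Char) (base : PySem.Dict (List Char) Int)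
    (r : PySem.Set (List Char)) (i : Int) : PySem.Set (List Char) :=
  let o := PySem.List.pyGetD s i ' '
  let js := PySem.List.pyRange (max 0 (i-2)) (min (N-2) (i+1))
  let removed := (js.filter (fun j => pvOk3 (PySem.List.slice s (some j) (some (j+3))))).map
    (fun j => PySem.List.slice s (some j) (some (j+3)))
  "abcdefghijklmnopqrstuvwxyz".toList.foldl (mooB_cstep F s base i js removed o) r

def moocount_alt (N : Int) (F : Int) (sss : String) : List String :=
  let s := sss.toList
  let base := mooB_base N s
  let result0 : PySem.Set (List Char) :=
    base.items.foldl (fun r pv => if F ≤ pv.2 then r.add pv.1 else r) PySem.Set.empty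
  let result := (PySem.List.pyRange 0 N).foldl (mooB_inner N F s base) result0
  PySem.List.sorted (result.map String.ofList) (fun x => x)

-- ===== PRECONDITION & SPEC =====
-- A indexes sss[i] for every i < N, so it raises IndexError exactly when N > len(sss);
-- Pre_ admits every input on which A returns.
def Pre_moocount (N : Int) (F : Int) (sss : String) : Prop := N ≤ (sss.toList.length : Int)
instance (N : Int) (F : Int) (sss : String) : Decidable (Pre_moocount N F sss) := by
  unfold Pre_moocount; infer_instance
def pvWitness_moocount : Int × Int × String := (3, 1, "abb")

def Spec_moocount (N : Int) (F : Int) (sss : String) (out : List String) : Prop := out = moocount_alt N F sss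
instance (N : Int) (F : Int) (sss : String) (out : List String) : Decidable (Spec_moocount N F sss out) := by
  unfold Spec_moocount; infer_instance

-- ===== CLAIM (what is proved, stated in full; the proofs are below) =====
def Claim_equal_moocount : Prop := ∀ (N : Int) (F : Int) (sss : String),
  Dom_moocount N F sss → Pre_moocount N F sss → Spec_moocount N F sss (moocount N F sss)

-- ===== LEMMAS AND PROOFS =====

-- window sss[j:j+3] and edited window sss[j:i] + c + sss[i+1:j+3]
def pvW (s : List Char) (j : Int) : List Char := PySem.List.slice s (some j) (some (j+3))
def pvNs (s : List Char) (i : Int) (c : Char) (j : Int) : List Char :=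
  PySem.List.slice s (some j) (some i) ++ [c] ++ PySem.List.slice s (some (i+1)) (some (j+3))
-- all qualifying windows of the string, with multiplicity
def pvWin (s : List Char) (N : Int) : List (List Char) :=
  ((PySem.List.pyRange 0 (N-2)).filter (fun j => pvOk3 (pvW s j))).map (pvW s)
def pvJs (N i : Int) : List Int := PySem.List.pyRange (max 0 (i-2)) (min (N-2) (i+1))
def pvDecs (s : List Char) (N i : Int) : List (List Char) :=
  ((pvJs N i).filter (fun j => pvOk3 (pvW s j))).map (pvW s)
def pvIncs (s : List Char) (N i : Int) (c : Char) : List (List Char) :=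
  ((pvJs N i).filter (fun j => pvOk3 (pvNs s i c j))).map (pvNs s i c)
-- baseline-qualifying patterns
def pvQ (s : List Char) (N F : Int) (x : List Char) : Prop :=
  x ∈ pvWin s N ∧ F ≤ ((pvWin s N).count x : Int)
-- loop invariant relating A's and B's accumulated result sets
def pvInv (s : List Char) (N F : Int) (rA rB : PySem.Set (List Char)) : Prop :=
  (∀ x, x ∈ rA ↔ x ∈ rB) ∧ (∀ x, pvQ s N F x → x ∈ rA) ∧ rA.Nodup ∧ rB.Nodup


-- membership / nodup through an "add if" fold
theorem pv_mem_foldl_addIf {beta : Type} (l : List beta) (cond : beta → Prop) [DecidablePred cond]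
    (key : beta → List Char) (r : PySem.Set (List Char)) (x : List Char) :
    x ∈ l.foldl (fun r pv => if cond pv then r.add (key pv) else r) r ↔
      x ∈ r ∨ ∃ pv ∈ l, cond pv ∧ x = key pv := by
  induction l generalizing r with
  | nil => simp
  | cons h t ih =>
    simp only [List.foldl_cons, ih]
    split_ifs with hc
    · simp only [PySem.Set.mem_add, List.mem_cons]
      constructor
      · rintro (⟨hx | hx⟩ | ⟨pv, hpv, hcp, hxk⟩)
        · exact Or.inl hx
        · exact Or.inr ⟨h, Or.inl rfl, hc, hx⟩
        · exact Or.inr ⟨pv, Or.inr hpv, hcp, hxk⟩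
      · rintro (hx | ⟨pv, hpv | hpv, hcp, hxk⟩)
        · exact Or.inl (Or.inl hx)
        · exact Or.inl (Or.inr (hpv ▸ hxk))
        · exact Or.inr ⟨pv, hpv, hcp, hxk⟩
    · constructor
      · rintro (hx | ⟨pv, hpv, hcp, hxk⟩)
        · exact Or.inl hx
        · exact Or.inr ⟨pv, List.mem_cons_of_mem _ hpv, hcp, hxk⟩
      · rintro (hx | ⟨pv, hpv, hcp, hxk⟩)
        · exact Or.inl hx
        · rcases List.mem_cons.mp hpv with rfl | hpv
          · exact absurd hcp hc
          · exact Or.inr ⟨pv, hpv, hcp, hxk⟩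

theorem pv_nodup_foldl_addIf {beta : Type} (l : List beta) (cond : beta → Prop) [DecidablePred cond]
    (key : beta → List Char) (r : PySem.Set (List Char)) (hr : r.Nodup) :
    (l.foldl (fun r pv => if cond pv then r.add (key pv) else r) r).Nodup := by
  induction l generalizing r with
  | nil => exact hr
  | cons h t ih =>
    simp only [List.foldl_cons]
    split_ifs with hc
    · exact ih _ (PySem.Set.nodup_add _ _ hr)
    · exact ih _ hr


-- getD / contains through insert and modify folds
theorem pv_getD_foldl_insert_of_not_mem (l : List (List Char)) (f : List Char → Int)
    (d : PySem.Dict (List Char) Int) (x : List Char) (hx : x ∉ l) :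
    (l.foldl (fun d k => d.insert k (f k)) d).getD x 0 = d.getD x 0 := by
  induction l generalizing d with
  | nil => rfl
  | cons h t ih =>
    simp only [List.foldl_cons]
    rw [ih _ (fun hm => hx (List.mem_cons_of_mem _ hm)), PySem.Dict.getD_insert,
      if_neg (by intro he; subst he; exact hx List.mem_cons_self)]

theorem pv_getD_foldl_insert_mem (l : List (List Char)) (f : List Char → Int)
    (hl : l.Nodup) (x : List Char) (hx : x ∈ l) (d : PySem.Dict (List Char) Int) :
    (l.foldl (fun d k => d.insert k (f k)) d).getD x 0 = f x := by
  induction l generalizing d with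
  | nil => cases hx
  | cons h t ih =>
    simp only [List.foldl_cons]
    rcases List.mem_cons.mp hx with rfl | hx
    · rw [pv_getD_foldl_insert_of_not_mem _ _ _ _ (List.nodup_cons.mp hl).1,
        PySem.Dict.getD_insert, if_pos rfl]
    · exact ih (List.Nodup.of_cons hl) hx _

theorem pv_contains_foldl_insert (l : List (List Char)) (f : List Char → Int)
    (d : PySem.Dict (List Char) Int) (x : List Char) :
    (l.foldl (fun d k => d.insert k (f k)) d).contains x = true ↔
      d.contains x = true ∨ x ∈ l := by
  induction l generalizing d with
  | nil => simp
  | cons h t ih =>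
    simp only [List.foldl_cons, ih, PySem.Dict.contains_insert, Bool.or_eq_true,
      beq_iff_eq, List.mem_cons]
    tauto

theorem pv_getD_foldl_modify_sub (l : List (List Char)) (d : PySem.Dict (List Char) Int)
    (v : List Char) :
    (l.foldl (fun d x => d.modify x 0 (fun y => y - 1)) d).getD v 0
      = d.getD v 0 - (l.count v : Int) := by
  induction l generalizing d with
  | nil => simp
  | cons h t ih =>
    simp only [List.foldl_cons, ih, PySem.Dict.getD_modify, List.count_cons]
    by_cases hv : v = h
    · subst hv; simp; omega
    · rw [if_neg hv, if_neg (fun he => hv (eq_of_beq he).symm)]; simp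

theorem pv_contains_foldl_modify (l : List (List Char)) (f : Int → Int)
    (d : PySem.Dict (List Char) Int) (v : List Char) :
    (l.foldl (fun d x => d.modify x 0 f) d).contains v = true ↔
      d.contains v = true ∨ v ∈ l := by
  induction l generalizing d with
  | nil => simp
  | cons h t ih =>
    simp only [List.foldl_cons, ih, PySem.Dict.contains_modify, Bool.or_eq_true,
      beq_iff_eq, List.mem_cons]
    tauto

theorem pv_getD_foldl_incIf (l : List Int) (q : Int → Bool) (g : Int → List Char)
    (d : PySem.Dict (List Char) Int) (v : List Char) :
    (l.foldl (fun d j => if q j then d.modify (g j) 0 (fun y => y + 1) else d) d).getD v 0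
      = d.getD v 0 + (((l.filter q).map g).count v : Int) := by
  induction l generalizing d with
  | nil => simp
  | cons h t ih =>
    simp only [List.foldl_cons]
    by_cases hq : q h
    · rw [List.filter_cons_of_pos hq, if_pos hq]
      simp only [ih, PySem.Dict.getD_modify, List.map_cons, List.count_cons]
      by_cases hv : v = g h
      · subst hv; simp; omega
      · rw [if_neg hv, if_neg (fun he => hv (eq_of_beq he).symm)]; simp
    · rw [List.filter_cons_of_neg hq, if_neg hq, ih]

theorem pv_contains_foldl_incIf (l : List Int) (q : Int → Bool) (g : Int → List Char)
    (d : PySem.Dict (List Char) Int) (v : List Char) :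
    (l.foldl (fun d j => if q j then d.modify (g j) 0 (fun y => y + 1) else d) d).contains v = true ↔
      d.contains v = true ∨ v ∈ (l.filter q).map g := by
  induction l generalizing d with
  | nil => simp
  | cons h t ih =>
    simp only [List.foldl_cons]
    by_cases hq : q h
    · rw [List.filter_cons_of_pos hq, if_pos hq]
      simp only [ih, PySem.Dict.contains_modify, List.map_cons, Bool.or_eq_true,
        beq_iff_eq, List.mem_cons]
      tauto
    · rw [List.filter_cons_of_neg hq, if_neg hq]
      exact ih d

theorem pv_getD_foldl_mix (l : List Int) (p q : Int → Bool) (f g : Int → List Char)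
    (d : PySem.Dict (List Char) Int) (v : List Char) :
    (l.foldl (fun d j =>
        if q j then (if p j then d.modify (f j) 0 (fun y => y - 1) else d).modify (g j) 0 (fun y => y + 1)
        else (if p j then d.modify (f j) 0 (fun y => y - 1) else d)) d).getD v 0
      = d.getD v 0 - (((l.filter p).map f).count v : Int) + (((l.filter q).map g).count v : Int) := by
  induction l generalizing d with
  | nil => simp
  | cons h t ih =>
    simp only [List.foldl_cons, ih]
    by_cases hp : p h <;> by_cases hq : q h <;>
      [rw [List.filter_cons_of_pos hp, List.filter_cons_of_pos hq, if_pos hp, if_pos hq];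
       rw [List.filter_cons_of_pos hp, List.filter_cons_of_neg hq, if_pos hp, if_neg hq];
       rw [List.filter_cons_of_neg hp, List.filter_cons_of_pos hq, if_neg hp, if_pos hq];
       rw [List.filter_cons_of_neg hp, List.filter_cons_of_neg hq, if_neg hp, if_neg hq]] <;>
      simp only [List.map_cons, List.count_cons, PySem.Dict.getD_modify, beq_iff_eq] <;>
      simp only [eq_comm] <;> split_ifs <;> subst_vars <;> (try simp_all) <;> omega

theorem pv_contains_foldl_mix (l : List Int) (p q : Int → Bool) (f g : Int → List Char)
    (d : PySem.Dict (List Char) Int) (v : List Char) :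
    (l.foldl (fun d j =>
        if q j then (if p j then d.modify (f j) 0 (fun y => y - 1) else d).modify (g j) 0 (fun y => y + 1)
        else (if p j then d.modify (f j) 0 (fun y => y - 1) else d)) d).contains v = true ↔
      d.contains v = true ∨ v ∈ (l.filter p).map f ∨ v ∈ (l.filter q).map g := by
  induction l generalizing d with
  | nil => simp
  | cons h t ih =>
    simp only [List.foldl_cons, ih]
    by_cases hp : p h <;> by_cases hq : q h <;>
      [rw [List.filter_cons_of_pos hp, List.filter_cons_of_pos hq, if_pos hp, if_pos hq];
       rw [List.filter_cons_of_pos hp, List.filter_cons_of_neg hq, if_pos hp, if_neg hq];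
       rw [List.filter_cons_of_neg hp, List.filter_cons_of_pos hq, if_neg hp, if_pos hq];
       rw [List.filter_cons_of_neg hp, List.filter_cons_of_neg hq, if_neg hp, if_neg hq]] <;>
      simp only [List.map_cons, PySem.Dict.contains_modify, Bool.or_eq_true, beq_iff_eq,
        List.mem_cons] <;>
      tauto

theorem pv_nodup_keys_modify (d : PySem.Dict (List Char) Int) (k : List Char) (f : Int → Int)
    (h : d.keys.Nodup) : (d.modify k 0 f).keys.Nodup := by
  have := PySem.Dict.nodup_keys_foldl_modify_key [k] (fun x => x) 0 (fun _ _ v => f v) d h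
  simpa using this

theorem pv_nodup_keys_mix (l : List Int) (p q : Int → Bool) (f g : Int → List Char)
    (d : PySem.Dict (List Char) Int) (h : d.keys.Nodup) :
    (l.foldl (fun d j =>
        if q j then (if p j then d.modify (f j) 0 (fun y => y - 1) else d).modify (g j) 0 (fun y => y + 1)
        else (if p j then d.modify (f j) 0 (fun y => y - 1) else d)) d).keys.Nodup := by
  induction l generalizing d with
  | nil => exact h
  | cons hd t ih =>
    simp only [List.foldl_cons]
    apply ih
    by_cases hp : p hd <;> by_cases hq : q hd <;>
      simp only [hp, hq, Bool.false_eq_true, if_true, if_false] <;>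
      first
        | exact pv_nodup_keys_modify _ _ _ (pv_nodup_keys_modify _ _ _ h)
        | exact pv_nodup_keys_modify _ _ _ h
        | exact h


-- the three characters of a window
theorem pv_take3 (s : List Char) (n : Nat) (h : n + 3 ≤ s.length) :
    (s.drop n).take 3 = [s.getD n ' ', s.getD (n+1) ' ', s.getD (n+2) ' '] := by
  induction s generalizing n with
  | nil => simp at h
  | cons a t ih =>
    cases n with
    | zero =>
      cases t with
      | nil => simp at h
      | cons b u =>
        cases u with
        | nil => simp at h
        | cons c v => simp
    | succ m =>
      have h' : m + 3 ≤ t.length := by simpa using h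
      simpa using ih m h'

theorem pvW_eq (s : List Char) (j : Int) (h0 : 0 ≤ j) (h3 : j + 3 ≤ (s.length : Int)) :
    pvW s j = [s.getD j.toNat ' ', s.getD (j.toNat+1) ' ', s.getD (j.toNat+2) ' '] := by
  unfold pvW
  have hj : j = (j.toNat : Int) := (Int.toNat_of_nonneg h0).symm
  have h4 : j + 3 = ((j.toNat + 3 : Nat) : Int) := by omega
  rw [h4, show some j = some ((j.toNat : Nat) : Int) from by rw [Int.toNat_of_nonneg h0],
    PySem.List.slice_natCast]
  have h5 : j.toNat + 3 - j.toNat = 3 := by omega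
  rw [h5]
  exact pv_take3 s j.toNat (by omega)

theorem pv_okA_eq (s : List Char) (j : Int) (h0 : 0 ≤ j) (h3 : j + 3 ≤ (s.length : Int)) :
    ((PySem.List.pyGetD s (j+1) ' ' == PySem.List.pyGetD s (j+2) ' ')
      && !(PySem.List.pyGetD s j ' ' == PySem.List.pyGetD s (j+1) ' ')) = pvOk3 (pvW s j) := by
  rw [pvW_eq s j h0 h3,
    PySem.List.pyGetD_of_nonneg s ' ' h0,
    PySem.List.pyGetD_of_nonneg s ' ' (by omega : (0:Int) ≤ j+1),
    PySem.List.pyGetD_of_nonneg s ' ' (by omega : (0:Int) ≤ j+2)]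
  have e1 : (j+1).toNat = j.toNat + 1 := by omega
  have e2 : (j+2).toNat = j.toNat + 2 := by omega
  rw [e1, e2]
  simp [pvOk3, PySem.List.pyGetD_ofNat']

-- bounds of the affected range
theorem pv_js_bounds {N i j : Int} (hj : j ∈ pvJs N i) :
    0 ≤ j ∧ j < N - 2 ∧ j ≤ i ∧ i ≤ j + 2 := by
  unfold pvJs at hj
  have := PySem.List.mem_pyRange_one.mp hj
  omega

-- characterization of B's baseline dict
theorem pv_mooB_base_eq (N : Int) (s : List Char) :
    mooB_base N s = (PySem.List.pyRange 0 (N - 2)).foldl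
      (fun d i => if pvOk3 (PySem.List.slice s (some i) (some (i+3))) then
        d.modify (PySem.List.slice s (some i) (some (i+3))) 0 (fun y => y + 1) else d)
      PySem.Dict.empty := rfl
theorem pv_base_getD (N : Int) (s : List Char) (x : List Char) :
    (mooB_base N s).getD x 0 = ((pvWin s N).count x : Int) := by
  rw [pv_mooB_base_eq]
  unfold pvWin
  rw [← List.foldl_filter, ← List.foldl_map
    (f := fun i => PySem.List.slice s (some i) (some (i+3)))
    (g := fun d w => PySem.Dict.modify d w 0 (fun y => y + 1))]
  rw [PySem.Dict.getD_foldl_modify_add_one]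
  simp only [PySem.Dict.getD_empty, zero_add]
  rfl

theorem pv_base_contains (N : Int) (s : List Char) (x : List Char) :
    (mooB_base N s).contains x = true ↔ x ∈ pvWin s N := by
  rw [pv_mooB_base_eq]
  unfold pvWin
  rw [← List.foldl_filter, ← List.foldl_map
    (f := fun i => PySem.List.slice s (some i) (some (i+3)))
    (g := fun d w => PySem.Dict.modify d w 0 (fun y => y + 1))]
  rw [pv_contains_foldl_modify]
  simp only [PySem.Dict.contains_empty, Bool.false_eq_true, false_or]
  exact Iff.rfl


-- characterization of A's position dict
theorem pv_mooA_ptp_eq (N : Int) (s : List Char) (hN : N ≤ (s.length : Int)) :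
    mooA_ptp N s = (PySem.List.pyRange 0 (N - 2)).foldl
      (fun d j => if pvOk3 (pvW s j) then d.modify (pvW s j) [] (fun t => t ++ [j]) else d)
      PySem.Dict.empty := by
  unfold mooA_ptp
  apply PySem.List.foldl_congr_mem
  intro acc j hj
  have hb := PySem.List.mem_pyRange_one.mp hj
  rw [pv_okA_eq s j (by omega) (by omega)]
  rfl

theorem pv_ptp_len (N : Int) (s : List Char) (hN : N ≤ (s.length : Int)) (x : List Char) :
    ((mooA_ptp N s).getD x []).length = (pvWin s N).count x := by
  rw [pv_mooA_ptp_eq N s hN, ← List.foldl_filter, ← List.foldl_map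
    (f := fun j : Int => (pvW s j, j))
    (g := fun d (p : List Char × Int) => PySem.Dict.modify d p.1 [] (fun t => t ++ [p.2]))]
  rw [PySem.Dict.getD_foldl_modify_append]
  simp only [PySem.Dict.getD_empty, List.nil_append, List.length_map, pvWin]
  rw [List.count_eq_countP, ← List.countP_eq_length_filter, List.countP_map, List.countP_map]
  rfl

theorem pv_ptp_contains (N : Int) (s : List Char) (hN : N ≤ (s.length : Int)) (x : List Char) :
    (mooA_ptp N s).contains x = true ↔ x ∈ pvWin s N := by
  rw [pv_mooA_ptp_eq N s hN, ← List.foldl_filter, PySem.Dict.contains_iff_mem_keys,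
    PySem.Dict.keys_foldl_modify_key _ (fun j => pvW s j) [] (fun _ j t => t ++ [j])]
  rw [PySem.Dict.keys_empty]
  rw [PySem.Set.mem_update]
  simp only [List.not_mem_nil, false_or]
  exact Iff.rfl

theorem pv_ptp_nodup (N : Int) (s : List Char) (hN : N ≤ (s.length : Int)) :
    (mooA_ptp N s).keys.Nodup := by
  rw [pv_mooA_ptp_eq N s hN, ← List.foldl_filter]
  exact PySem.Dict.nodup_keys_foldl_modify_key _ (fun j => pvW s j) [] (fun _ j t => t ++ [j]) _
    (by rw [PySem.Dict.keys_empty]; exact List.nodup_nil)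

-- characterization of A's per-edit starting dict ptc0
theorem pv_ptc0_getD (N : Int) (s : List Char) (hN : N ≤ (s.length : Int)) (x : List Char) :
    ((mooA_ptp N s).items.foldl (fun d pv => d.insert pv.1 (pv.2.length : Int))
        PySem.Dict.empty).getD x 0 = ((pvWin s N).count x : Int) := by
  rw [PySem.Dict.items_eq_map_keys _ (pv_ptp_nodup N s hN) [], List.foldl_map]
  by_cases hx : x ∈ (mooA_ptp N s).keys
  · rw [pv_getD_foldl_insert_mem (mooA_ptp N s).keys
      (fun k => (((mooA_ptp N s).getD k []).length : Int)) (pv_ptp_nodup N s hN) x hx]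
    rw [pv_ptp_len N s hN x]
  · rw [pv_getD_foldl_insert_of_not_mem (mooA_ptp N s).keys
      (fun k => (((mooA_ptp N s).getD k []).length : Int)) _ x hx, PySem.Dict.getD_empty]
    have hw : x ∉ pvWin s N := fun hw =>
      hx ((PySem.Dict.contains_iff_mem_keys _ _).mp ((pv_ptp_contains N s hN x).mpr hw))
    rw [List.count_eq_zero.mpr hw]
    rfl

theorem pv_ptc0_contains (N : Int) (s : List Char) (hN : N ≤ (s.length : Int)) (x : List Char) :
    ((mooA_ptp N s).items.foldl (fun d pv => d.insert pv.1 (pv.2.length : Int))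
        PySem.Dict.empty).contains x = true ↔ x ∈ pvWin s N := by
  rw [PySem.Dict.items_eq_map_keys _ (pv_ptp_nodup N s hN) [], List.foldl_map]
  rw [pv_contains_foldl_insert (mooA_ptp N s).keys
    (fun k => (((mooA_ptp N s).getD k []).length : Int)) PySem.Dict.empty x]
  simp only [PySem.Dict.contains_empty, Bool.false_eq_true, false_or]
  rw [← PySem.Dict.contains_iff_mem_keys]
  exact pv_ptp_contains N s hN x

theorem pv_ptc0_nodup (N : Int) (s : List Char) :
    ((mooA_ptp N s).items.foldl (fun d pv => d.insert pv.1 (pv.2.length : Int))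
        PySem.Dict.empty).keys.Nodup := by
  exact PySem.Dict.nodup_keys_foldl_insert_key (mooA_ptp N s).items
    (fun pv : List Char × List Int => pv.1)
    (fun _ pv => (pv.2.length : Int)) PySem.Dict.empty
    (by rw [PySem.Dict.keys_empty]; exact List.nodup_nil)


theorem pv_decs_sub (s : List Char) (N i : Int) : ∀ x ∈ pvDecs s N i, x ∈ pvWin s N := by
  intro x hx
  unfold pvDecs at hx
  rcases List.mem_map.mp hx with ⟨j, hj, rfl⟩
  rcases List.mem_filter.mp hj with ⟨hjs, hok⟩
  have hb := pv_js_bounds hjs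
  unfold pvWin
  exact List.mem_map.mpr ⟨j, List.mem_filter.mpr
    ⟨PySem.List.mem_pyRange_one.mpr ⟨by omega, by omega⟩, hok⟩, rfl⟩

theorem pv_affected_contains (N i : Int) (s : List Char) (hN : N ≤ (s.length : Int))
    (j : Int) (hj : j ∈ pvJs N i) :
    (mooA_affected N s (pvJs N i)).contains (pvW s j) = pvOk3 (pvW s j) := by
  have hcongr : mooA_affected N s (pvJs N i) =
      (pvJs N i).foldl (fun a j => if pvOk3 (pvW s j) then a.add (pvW s j) else a)
        PySem.Set.empty := by
    unfold mooA_affected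
    apply PySem.List.foldl_congr_mem
    intro a j' hj'
    have hb := pv_js_bounds hj'
    rw [show (decide (j' + 2 < N)) = true from decide_eq_true (by omega), Bool.true_and,
      pv_okA_eq s j' (by omega) (by omega)]
    rfl
  have hmem : ∀ x, x ∈ mooA_affected N s (pvJs N i) ↔
      ∃ j' ∈ pvJs N i, pvOk3 (pvW s j') = true ∧ x = pvW s j' := by
    intro x
    rw [hcongr]
    exact pv_mem_foldl_addIf (pvJs N i) (fun j' => pvOk3 (pvW s j') = true) (pvW s)
      PySem.Set.empty x |>.trans (by simp)
  by_cases hok : pvOk3 (pvW s j)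
  · rw [hok]
    exact (PySem.Set.contains_iff _ _).mpr ((hmem _).mpr ⟨j, hj, hok, rfl⟩)
  · have : ¬ pvW s j ∈ mooA_affected N s (pvJs N i) := by
      intro hx
      rcases (hmem _).mp hx with ⟨j', _, hok', he⟩
      rw [he] at hok
      exact hok hok'
    rw [Bool.eq_false_iff.mpr hok]
    rw [← Bool.not_eq_true]
    intro hcont
    exact this ((PySem.Set.contains_iff _ _).mp hcont)

theorem pv_nodup_keys_modify_fold (l : List (List Char)) (d : PySem.Dict (List Char) Int)
    (h : d.keys.Nodup) :
    (l.foldl (fun d x => d.modify x 0 (fun y => y - 1)) d).keys.Nodup := by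
  induction l generalizing d with
  | nil => exact h
  | cons hd t ih => exact ih _ (pv_nodup_keys_modify _ _ _ h)

theorem pv_nodup_keys_incIf (l : List Int) (q : Int → Bool) (g : Int → List Char)
    (d : PySem.Dict (List Char) Int) (h : d.keys.Nodup) :
    (l.foldl (fun d j => if q j then d.modify (g j) 0 (fun y => y + 1) else d) d).keys.Nodup := by
  induction l generalizing d with
  | nil => exact h
  | cons hd t ih =>
    simp only [List.foldl_cons]
    by_cases hq : q hd
    · rw [if_pos hq]; exact ih _ (pv_nodup_keys_modify _ _ _ h)
    · rw [if_neg hq]; exact ih _ h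


-- proof-side names for the per-edit dicts of the two ports
def pvPtc (N : Int) (s : List Char) (i : Int) (c : Char) : PySem.Dict (List Char) Int :=
  (pvJs N i).foldl (mooA_ptcstep N s (mooA_affected N s (pvJs N i)) i c)
    ((mooA_ptp N s).items.foldl (fun d pv => d.insert pv.1 (pv.2.length : Int)) PySem.Dict.empty)
def pvDelta (N : Int) (s : List Char) (i : Int) (c : Char) : PySem.Dict (List Char) Int :=
  (pvJs N i).foldl (mooB_deltastep s i c)
    ((pvDecs s N i).foldl (fun d w => d.modify w 0 (fun x => x - 1)) PySem.Dict.empty)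

theorem pv_ptcstep_congr (N : Int) (s : List Char) (hN : N ≤ (s.length : Int)) (i : Int) (c : Char)
    (d0 : PySem.Dict (List Char) Int) :
    (pvJs N i).foldl (mooA_ptcstep N s (mooA_affected N s (pvJs N i)) i c) d0
      = (pvJs N i).foldl (fun d j =>
          if pvOk3 (pvNs s i c j) then
            (if pvOk3 (pvW s j) then d.modify (pvW s j) 0 (fun y => y - 1) else d).modify
              (pvNs s i c j) 0 (fun y => y + 1)
          else (if pvOk3 (pvW s j) then d.modify (pvW s j) 0 (fun y => y - 1) else d)) d0 := by
  apply PySem.List.foldl_congr_mem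
  intro acc j hj
  have hb := pv_js_bounds hj
  unfold mooA_ptcstep
  simp only []
  rw [show PySem.List.slice s (some j) (some (j+3)) = pvW s j from rfl]
  rw [show PySem.List.slice s (some j) (some i) ++ [c]
      ++ PySem.List.slice s (some (i+1)) (some (j+3)) = pvNs s i c j from rfl]
  rw [show (decide (j + 2 < N)) = true from decide_eq_true (by omega), Bool.true_and]
  rw [pv_affected_contains N i s hN j hj]
  rw [show (decide (j ≤ i) && decide (i < j + 3)) = true from by
    rw [decide_eq_true (by omega : j ≤ i), decide_eq_true (by omega : i < j + 3)]; rfl]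
  rw [if_pos rfl]
  rw [show (((pvNs s i c j).length == 3)
      && (PySem.List.pyGetD (pvNs s i c j) 1 ' ' == PySem.List.pyGetD (pvNs s i c j) 2 ' ')
      && !(PySem.List.pyGetD (pvNs s i c j) 0 ' ' == PySem.List.pyGetD (pvNs s i c j) 1 ' '))
      = pvOk3 (pvNs s i c j) from rfl]

theorem pv_deltastep_eq (s : List Char) (i : Int) (c : Char) :
    mooB_deltastep s i c = (fun d j =>
      if pvOk3 (pvNs s i c j) then d.modify (pvNs s i c j) 0 (fun y => y + 1) else d) := by
  funext d j
  unfold mooB_deltastep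
  rfl

theorem pv_ptc_getD (N : Int) (s : List Char) (hN : N ≤ (s.length : Int)) (i : Int) (c : Char)
    (x : List Char) :
    (pvPtc N s i c).getD x 0 = ((pvWin s N).count x : Int)
      - ((pvDecs s N i).count x : Int) + ((pvIncs s N i c).count x : Int) := by
  unfold pvPtc
  rw [pv_ptcstep_congr N s hN i c, pv_getD_foldl_mix, pv_ptc0_getD N s hN x]
  rfl

theorem pv_ptc_keys_mem (N : Int) (s : List Char) (hN : N ≤ (s.length : Int)) (i : Int) (c : Char)
    (x : List Char) :
    x ∈ (pvPtc N s i c).keys ↔ x ∈ pvWin s N ∨ x ∈ pvDecs s N i ∨ x ∈ pvIncs s N i c := by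
  rw [← PySem.Dict.contains_iff_mem_keys]
  unfold pvPtc
  rw [pv_ptcstep_congr N s hN i c, pv_contains_foldl_mix, pv_ptc0_contains N s hN x]
  exact Iff.rfl

theorem pv_ptc_nodup (N : Int) (s : List Char) (hN : N ≤ (s.length : Int)) (i : Int) (c : Char) :
    (pvPtc N s i c).keys.Nodup := by
  unfold pvPtc
  rw [pv_ptcstep_congr N s hN i c]
  exact pv_nodup_keys_mix _ _ _ _ _ _ (pv_ptc0_nodup N s)

theorem pv_delta_getD (N : Int) (s : List Char) (i : Int) (c : Char) (x : List Char) :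
    (pvDelta N s i c).getD x 0 = ((pvIncs s N i c).count x : Int) - ((pvDecs s N i).count x : Int) := by
  unfold pvDelta
  rw [pv_deltastep_eq, pv_getD_foldl_incIf, pv_getD_foldl_modify_sub, PySem.Dict.getD_empty]
  have : ((((pvJs N i).filter (fun j => pvOk3 (pvNs s i c j))).map (pvNs s i c)).count x : Int)
      = ((pvIncs s N i c).count x : Int) := rfl
  omega

theorem pv_delta_keys_mem (N : Int) (s : List Char) (i : Int) (c : Char) (x : List Char) :
    x ∈ (pvDelta N s i c).keys ↔ x ∈ pvDecs s N i ∨ x ∈ pvIncs s N i c := by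
  rw [← PySem.Dict.contains_iff_mem_keys]
  unfold pvDelta
  rw [pv_deltastep_eq, pv_contains_foldl_incIf, pv_contains_foldl_modify,
    PySem.Dict.contains_empty]
  simp only [Bool.false_eq_true, false_or]
  exact Iff.rfl

theorem pv_delta_nodup (N : Int) (s : List Char) (i : Int) (c : Char) :
    (pvDelta N s i c).keys.Nodup := by
  unfold pvDelta
  rw [pv_deltastep_eq]
  exact pv_nodup_keys_incIf _ _ _ _
    (pv_nodup_keys_modify_fold _ _ (by rw [PySem.Dict.keys_empty]; exact List.nodup_nil))


theorem pv_outA_mem (N F : Int) (s : List Char) (hN : N ≤ (s.length : Int)) (i : Int) (c : Char)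
    (rA : PySem.Set (List Char)) (x : List Char) :
    x ∈ (pvPtc N s i c).items.foldl (fun r pv => if F ≤ pv.2 then r.add pv.1 else r) rA ↔
      x ∈ rA ∨ (x ∈ (pvPtc N s i c).keys ∧ F ≤ (pvPtc N s i c).getD x 0) := by
  rw [pv_mem_foldl_addIf ((pvPtc N s i c).items) (fun pv => F ≤ pv.2) Prod.fst rA x]
  apply or_congr_right
  rw [PySem.Dict.items_eq_map_keys _ (pv_ptc_nodup N s hN i c) 0]
  constructor
  · rintro ⟨pv, hpv, hF, rfl⟩
    rcases List.mem_map.mp hpv with ⟨k, hk, rfl⟩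
    exact ⟨hk, hF⟩
  · rintro ⟨hk, hF⟩
    exact ⟨(x, (pvPtc N s i c).getD x 0), List.mem_map.mpr ⟨x, hk, rfl⟩, hF, rfl⟩

theorem pv_outB_mem (N F : Int) (s : List Char) (i : Int) (c : Char)
    (rB : PySem.Set (List Char)) (x : List Char) :
    x ∈ (pvDelta N s i c).items.foldl
        (fun r pv => if F ≤ (mooB_base N s).getD pv.1 0 + pv.2 then r.add pv.1 else r) rB ↔
      x ∈ rB ∨ (x ∈ (pvDelta N s i c).keys ∧
        F ≤ (mooB_base N s).getD x 0 + (pvDelta N s i c).getD x 0) := by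
  rw [pv_mem_foldl_addIf ((pvDelta N s i c).items)
    (fun pv => F ≤ (mooB_base N s).getD pv.1 0 + pv.2) Prod.fst rB x]
  apply or_congr_right
  rw [PySem.Dict.items_eq_map_keys _ (pv_delta_nodup N s i c) 0]
  constructor
  · rintro ⟨pv, hpv, hF, rfl⟩
    rcases List.mem_map.mp hpv with ⟨k, hk, rfl⟩
    exact ⟨hk, hF⟩
  · rintro ⟨hk, hF⟩
    exact ⟨(x, (pvDelta N s i c).getD x 0), List.mem_map.mpr ⟨x, hk, rfl⟩, hF, rfl⟩

-- one inner-character step preserves the invariant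
theorem pv_cstep (N F : Int) (s : List Char) (hN : N ≤ (s.length : Int)) (i : Int)
    (o c : Char) (rA rB : PySem.Set (List Char)) (hinv : pvInv s N F rA rB) :
    pvInv s N F
      (mooA_cstep N F s (mooA_ptp N s) i (pvJs N i) (mooA_affected N s (pvJs N i)) o rA c)
      (mooB_cstep F s (mooB_base N s) i (pvJs N i) (pvDecs s N i) o rB c) := by
  obtain ⟨hAB, hQ, hndA, hndB⟩ := hinv
  unfold mooA_cstep mooB_cstep
  by_cases hc : (c == o) = true
  · rw [if_pos hc, if_pos hc]; exact ⟨hAB, hQ, hndA, hndB⟩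
  · rw [if_neg hc, if_neg hc]
    show pvInv s N F
      ((pvPtc N s i c).items.foldl (fun r pv => if F ≤ pv.2 then r.add pv.1 else r) rA)
      ((pvDelta N s i c).items.foldl
        (fun r pv => if F ≤ (mooB_base N s).getD pv.1 0 + pv.2 then r.add pv.1 else r) rB)
    refine ⟨?_, ?_, ?_, ?_⟩
    · intro x
      rw [pv_outA_mem N F s hN i c rA x, pv_outB_mem N F s i c rB x]
      have hval := pv_ptc_getD N s hN i c x
      have hdval := pv_delta_getD N s i c x
      have hbase := pv_base_getD N s x
      have hkA := pv_ptc_keys_mem N s hN i c x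
      have hkB := pv_delta_keys_mem N s i c x
      constructor
      · rintro (hx | ⟨hk, hF⟩)
        · exact Or.inl ((hAB x).mp hx)
        · by_cases hd : x ∈ pvDecs s N i ∨ x ∈ pvIncs s N i c
          · refine Or.inr ⟨hkB.mpr hd, ?_⟩
            rw [hbase, hdval]
            rw [hval] at hF
            omega
          · rw [not_or] at hd
            have h1 : (pvDecs s N i).count x = 0 := List.count_eq_zero.mpr hd.1
            have h2 : (pvIncs s N i c).count x = 0 := List.count_eq_zero.mpr hd.2
            have hw : x ∈ pvWin s N := by
              rcases hkA.mp hk with h | h | h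
              · exact h
              · exact absurd h hd.1
              · exact absurd h hd.2
            have hqx : pvQ s N F x := by
              refine ⟨hw, ?_⟩
              rw [hval, h1, h2] at hF
              push_cast at hF ⊢
              omega
            exact Or.inl ((hAB x).mp (hQ x hqx))
      · rintro (hx | ⟨hk, hF⟩)
        · exact Or.inl ((hAB x).mpr hx)
        · have hd := hkB.mp hk
          refine Or.inr ⟨hkA.mpr ?_, ?_⟩
          · rcases hd with h | h
            · exact Or.inl (pv_decs_sub s N i x h)
            · exact Or.inr (Or.inr h)
          · rw [hval]
            rw [hbase, hdval] at hF
            omega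
    · intro x hQx
      rw [pv_outA_mem N F s hN i c rA x]
      exact Or.inl (hQ x hQx)
    · exact pv_nodup_foldl_addIf _ _ _ _ hndA
    · exact pv_nodup_foldl_addIf _ _ _ _ hndB


theorem pv_foldl2 {γ : Type} (l : List γ)
    (fA fB : PySem.Set (List Char) → γ → PySem.Set (List Char))
    (P : PySem.Set (List Char) → PySem.Set (List Char) → Prop)
    (hstep : ∀ rA rB, P rA rB → ∀ x ∈ l, P (fA rA x) (fB rB x))
    (rA rB : PySem.Set (List Char)) (h : P rA rB) :
    P (l.foldl fA rA) (l.foldl fB rB) := by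
  induction l generalizing rA rB with
  | nil => exact h
  | cons hd t ih =>
    simp only [List.foldl_cons]
    exact ih (fun rA rB h x hx => hstep rA rB h x (List.mem_cons_of_mem _ hx)) _ _
      (hstep rA rB h hd List.mem_cons_self)

theorem pv_inner (N F : Int) (s : List Char) (hN : N ≤ (s.length : Int)) (i : Int)
    (rA rB : PySem.Set (List Char)) (h : pvInv s N F rA rB) :
    pvInv s N F (mooA_inner N F s (mooA_ptp N s) rA i) (mooB_inner N F s (mooB_base N s) rB i) := by
  unfold mooA_inner mooB_inner
  exact pv_foldl2 _ _ _ _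
    (fun rA rB h c _ => pv_cstep N F s hN i (PySem.List.pyGetD s i ' ') c rA rB h) rA rB h

theorem pv_base_nodup (N : Int) (s : List Char) : (mooB_base N s).keys.Nodup := by
  rw [pv_mooB_base_eq, ← List.foldl_filter]
  exact PySem.Dict.nodup_keys_foldl_modify_key _
    (fun i => PySem.List.slice s (some i) (some (i+3))) 0 (fun _ _ v => v + 1) _
    (by rw [PySem.Dict.keys_empty]; exact List.nodup_nil)

theorem pv_result0A_mem (N F : Int) (s : List Char) (hN : N ≤ (s.length : Int)) (x : List Char) :
    x ∈ (mooA_ptp N s).items.foldl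
        (fun r pv => if F ≤ (pv.2.length : Int) then r.add pv.1 else r) PySem.Set.empty ↔
      pvQ s N F x := by
  rw [pv_mem_foldl_addIf ((mooA_ptp N s).items) (fun pv => F ≤ (pv.2.length : Int))
    Prod.fst PySem.Set.empty x]
  rw [PySem.Dict.items_eq_map_keys _ (pv_ptp_nodup N s hN) []]
  constructor
  · rintro (hx | ⟨pv, hpv, hF, rfl⟩)
    · exact absurd hx (List.not_mem_nil)
    · rcases List.mem_map.mp hpv with ⟨k, hk, rfl⟩
      refine ⟨(pv_ptp_contains N s hN k).mp ((PySem.Dict.contains_iff_mem_keys _ _).mpr hk), ?_⟩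
      rw [← pv_ptp_len N s hN k]
      exact hF
  · rintro ⟨hw, hF⟩
    refine Or.inr ⟨(x, (mooA_ptp N s).getD x []), List.mem_map.mpr ⟨x, ?_, rfl⟩, ?_, rfl⟩
    · exact (PySem.Dict.contains_iff_mem_keys _ _).mp ((pv_ptp_contains N s hN x).mpr hw)
    · rw [pv_ptp_len N s hN x]
      exact hF

theorem pv_result0B_mem (N F : Int) (s : List Char) (x : List Char) :
    x ∈ (mooB_base N s).items.foldl
        (fun r pv => if F ≤ pv.2 then r.add pv.1 else r) PySem.Set.empty ↔
      pvQ s N F x := by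
  rw [pv_mem_foldl_addIf ((mooB_base N s).items) (fun pv => F ≤ pv.2)
    Prod.fst PySem.Set.empty x]
  rw [PySem.Dict.items_eq_map_keys _ (pv_base_nodup N s) 0]
  constructor
  · rintro (hx | ⟨pv, hpv, hF, rfl⟩)
    · exact absurd hx (List.not_mem_nil)
    · rcases List.mem_map.mp hpv with ⟨k, hk, rfl⟩
      refine ⟨(pv_base_contains N s k).mp ((PySem.Dict.contains_iff_mem_keys _ _).mpr hk), ?_⟩
      rw [← pv_base_getD N s k]
      exact hF
  · rintro ⟨hw, hF⟩
    refine Or.inr ⟨(x, (mooB_base N s).getD x 0), List.mem_map.mpr ⟨x, ?_, rfl⟩, ?_, rfl⟩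
    · exact (PySem.Dict.contains_iff_mem_keys _ _).mp ((pv_base_contains N s x).mpr hw)
    · rw [pv_base_getD N s x]
      exact hF

-- ===== VERDICT (by name: the statement is the Claim_ definition above) =====
theorem moocount_spec : Claim_equal_moocount := by
  intro N F sss _ hpre
  unfold Spec_moocount moocount moocount_alt
  simp only []
  have hN : N ≤ ((sss.toList.length : Nat) : Int) := hpre
  have h0A := fun x => pv_result0A_mem N F sss.toList hN x
  have h0B := fun x => pv_result0B_mem N F sss.toList x
  have hndA0 : (PySem.Set.empty : PySem.Set (List Char)).Nodup := List.nodup_nil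
  have hinv0 : pvInv sss.toList N F
      ((mooA_ptp N sss.toList).items.foldl
        (fun r pv => if F ≤ (pv.2.length : Int) then r.add pv.1 else r) PySem.Set.empty)
      ((mooB_base N sss.toList).items.foldl
        (fun r pv => if F ≤ pv.2 then r.add pv.1 else r) PySem.Set.empty) := by
    refine ⟨fun x => (h0A x).trans (h0B x).symm, fun x hq => (h0A x).mpr hq, ?_, ?_⟩
    · exact pv_nodup_foldl_addIf _ _ _ _ hndA0
    · exact pv_nodup_foldl_addIf _ _ _ _ hndA0
  have hfin := pv_foldl2 (PySem.List.pyRange 0 N)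
    (mooA_inner N F sss.toList (mooA_ptp N sss.toList))
    (mooB_inner N F sss.toList (mooB_base N sss.toList))
    (pvInv sss.toList N F)
    (fun rA rB h i _ => pv_inner N F sss.toList hN i rA rB h)
    _ _ hinv0
  obtain ⟨hAB, _, hndA, hndB⟩ := hfin
  have hperm := (List.perm_ext_iff_of_nodup hndA hndB).mpr hAB
  exact PySem.List.sorted_eq_sorted_of_perm _ _ (fun x => x)
    (fun a b h => h) (hperm.map String.ofList)
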